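-- pv_equiv track=rewrite | github.com/mbaocha/dialogcart | src/intents/unified_api/mappers.py | _group_raw_rasa_entities
-- ===== SOURCE A (Python) =====
-- def _group_raw_rasa_entities(raw_entities):
--     """Group flat Rasa entities into combined items.
--
--     Expects a list of dicts like:
--       [{"entity": "quantity", "value": "3"}, {"entity": "unit", "value": "kg"}, {"entity": "product", "value": "rice"}, ...]
--
--     Returns a list of dicts like:
--       [{"product": "rice", "quantity": 3, "unit": "kg"}, {"product": "beans", "quantity": 5, "unit": "kg"}]
--     """
--     if not raw_entities:
--         return []
--
--     buckets = {"product": [], "quantity": [], "unit": []}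
--     for e in raw_entities:
--         name = e.get("entity")
--         value = e.get("value")
--         if name in buckets and value is not None:
--             buckets[name].append(value)
--
--     max_len = max((len(v) for v in buckets.values()), default=0)
--     grouped = []
--     for i in range(max_len):
--         item = {}
--         if i < len(buckets["product"]):
--             item["product"] = buckets["product"][i]
--         if i < len(buckets["quantity"]):
--             item["quantity"] = buckets["quantity"][i]
--         if i < len(buckets["unit"]):
--             item["unit"] = buckets["unit"][i]
--         if item:
--             grouped.append(item)
--     return grouped
-- ===== SOURCE B (Python) =====
-- def _group_raw_rasa_entities(raw_entities):
--     """Single pass: place each value directly into its row slot, then render rows as dicts."""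
--     if not raw_entities:
--         return []
--     keys = ("product", "quantity", "unit")
--     counts = {"product": 0, "quantity": 0, "unit": 0}
--     rows = []
--     for e in raw_entities:
--         name = e.get("entity")
--         value = e.get("value")
--         if name in counts and value is not None:
--             i = counts[name]
--             counts[name] = i + 1
--             if len(rows) <= i:
--                 rows.append([None, None, None])
--             rows[i][keys.index(name)] = value
--     return [{k: v for k, v in zip(keys, row) if v is not None} for row in rows]
-- ===== Notes on version B (the rewrite author's own statement) =====
-- stated objective: alternative
-- what changed: Replaced A's two phases (fill three bucket lists, then merge them index-by-index over range(max_len)) with a single pass that keeps per-key counters and writes each value straight into its row's slot, rendering the rows at the end.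
import Mathlib
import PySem

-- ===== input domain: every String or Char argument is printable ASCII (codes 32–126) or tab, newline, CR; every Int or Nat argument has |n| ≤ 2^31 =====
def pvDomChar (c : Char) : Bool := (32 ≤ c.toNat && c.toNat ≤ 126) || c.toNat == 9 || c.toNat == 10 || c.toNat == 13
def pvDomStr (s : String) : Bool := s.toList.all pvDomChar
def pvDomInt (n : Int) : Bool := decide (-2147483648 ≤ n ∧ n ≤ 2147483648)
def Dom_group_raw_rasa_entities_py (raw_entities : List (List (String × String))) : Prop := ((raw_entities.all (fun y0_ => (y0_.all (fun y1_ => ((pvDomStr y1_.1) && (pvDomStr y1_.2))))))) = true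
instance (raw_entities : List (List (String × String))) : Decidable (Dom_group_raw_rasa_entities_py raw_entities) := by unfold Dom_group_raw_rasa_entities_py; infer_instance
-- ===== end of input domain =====

-- B replaces A's two phases (three bucket lists, then an index-range merge loop) with a single
-- pass that writes each value straight into its row slot; same return value, different decomposition.

-- ===== PORT A =====
-- one step of A's first loop: append the value to the matching bucket (product, quantity, unit)
def pyA_bucket (b : List String × List String × List String) (e : List (String × String)) :
    List String × List String × List String :=
  match (PySem.Dict.ofList e).get? "entity", (PySem.Dict.ofList e).get? "value" with
  | some n, some v =>
      if n = "product" then (b.1 ++ [v], b.2.1, b.2.2)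
      else if n = "quantity" then (b.1, b.2.1 ++ [v], b.2.2)
      else if n = "unit" then (b.1, b.2.1, b.2.2 ++ [v])
      else b
  | _, _ => b

-- the item built for index i in A's second loop (keys inserted in the fixed order product, quantity, unit)
def pyA_item (p q u : List String) (i : Nat) : List (String × String) :=
  (if h : i < p.length then [("product", p[i])] else []) ++
  (if h : i < q.length then [("quantity", q[i])] else []) ++
  (if h : i < u.length then [("unit", u[i])] else [])

def group_raw_rasa_entities_py (raw_entities : List (List (String × String))) :
    List (List (String × String)) :=
  if raw_entities = [] then []
  else
    let b := raw_entities.foldl pyA_bucket ([], [], [])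
    let max_len := max (max b.1.length b.2.1.length) b.2.2.length
    (List.range max_len).foldl
      (fun grouped i =>
        let item := pyA_item b.1 b.2.1 b.2.2 i
        if item = [] then grouped else grouped ++ [item]) []

-- ===== PORT B =====
-- one step of B's single pass: bump the counter for the entity and write the value into its row slot
def pyB_step
    (st : (Nat × Nat × Nat) × List (Option String × Option String × Option String))
    (e : List (String × String)) :
    (Nat × Nat × Nat) × List (Option String × Option String × Option String) :=
  match (PySem.Dict.ofList e).get? "entity", (PySem.Dict.ofList e).get? "value" with
  | some n, some v =>
      if n = "product" then
        let i := st.1.1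
        let rows := if st.2.length ≤ i then st.2 ++ [(none, none, none)] else st.2
        ((i + 1, st.1.2.1, st.1.2.2), rows.modify i (fun r => (some v, r.2.1, r.2.2)))
      else if n = "quantity" then
        let i := st.1.2.1
        let rows := if st.2.length ≤ i then st.2 ++ [(none, none, none)] else st.2
        ((st.1.1, i + 1, st.1.2.2), rows.modify i (fun r => (r.1, some v, r.2.2)))
      else if n = "unit" then
        let i := st.1.2.2
        let rows := if st.2.length ≤ i then st.2 ++ [(none, none, none)] else st.2
        ((st.1.1, st.1.2.1, i + 1), rows.modify i (fun r => (r.1, r.2.1, some v)))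
      else st
  | _, _ => st

-- render one row as a dict, skipping empty slots (keys product, quantity, unit)
def pyB_render (r : Option String × Option String × Option String) : List (String × String) :=
  (match r.1 with | some v => [("product", v)] | none => []) ++
  (match r.2.1 with | some v => [("quantity", v)] | none => []) ++
  (match r.2.2 with | some v => [("unit", v)] | none => [])

def group_raw_rasa_entities_py_alt (raw_entities : List (List (String × String))) :
    List (List (String × String)) :=
  if raw_entities = [] then []
  else ((raw_entities.foldl pyB_step ((0, 0, 0), [])).2).map pyB_render

-- ===== PRECONDITION & SPEC =====
def Spec_group_raw_rasa_entities_py (raw_entities : List (List (String × String))) (out : List (List (String × String))) : Prop := out = group_raw_rasa_entities_py_alt raw_entities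
instance (raw_entities : List (List (String × String))) (out : List (List (String × String))) : Decidable (Spec_group_raw_rasa_entities_py raw_entities out) := by unfold Spec_group_raw_rasa_entities_py; infer_instance

-- ===== CLAIM (what is proved, stated in full; the proofs are below) =====
def Claim_equal_group_raw_rasa_entities_py : Prop := ∀ (raw_entities : List (List (String × String))), Dom_group_raw_rasa_entities_py raw_entities → Spec_group_raw_rasa_entities_py raw_entities (group_raw_rasa_entities_py raw_entities)

-- ===== LEMMAS AND PROOFS =====

-- the rows B maintains, characterised from A's buckets
def pvRowsOf (p q u : List String) : List (Option String × Option String × Option String) :=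
  (List.range (max (max p.length q.length) u.length)).map (fun i => (p[i]?, q[i]?, u[i]?))

lemma pvRowsOf_length (p q u : List String) :
    (pvRowsOf p q u).length = max (max p.length q.length) u.length := by
  simp [pvRowsOf]

lemma pvRowsOf_getElem? (p q u : List String) (j : Nat) :
    (pvRowsOf p q u)[j]? =
      if j < max (max p.length q.length) u.length then some (p[j]?, q[j]?, u[j]?) else none := by
  rw [pvRowsOf, List.getElem?_map]
  by_cases h : j < max (max p.length q.length) u.length
  · rw [List.getElem?_range h, if_pos h]; rfl
  · rw [if_neg h, List.getElem?_eq_none (by simpa using h)]; rfl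

lemma pv_getElem?_snoc {α : Type} (l : List α) (v : α) (j : Nat) :
    (l ++ [v])[j]? = if j = l.length then some v else l[j]? := by
  rcases Nat.lt_trichotomy j l.length with h|h|h
  · rw [List.getElem?_append_left h, if_neg (by omega)]
  · subst h; simp
  · rw [if_neg (by omega)]
    rw [List.getElem?_eq_none (by simpa using h), List.getElem?_eq_none (by omega)]

lemma pv_step_product (p q u : List String) (v : String) :
    ((if (pvRowsOf p q u).length <= p.length then pvRowsOf p q u ++ [(none, none, none)]
      else pvRowsOf p q u).modify p.length (fun r => (some v, r.2.1, r.2.2)))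
    = pvRowsOf (p ++ [v]) q u := by
  apply List.ext_getElem?
  intro j
  by_cases hext : (pvRowsOf p q u).length <= p.length
  · rw [if_pos hext]
    rw [pvRowsOf_length] at hext
    rw [List.getElem?_modify, pv_getElem?_snoc, pvRowsOf_length, pvRowsOf_getElem?,
      pvRowsOf_getElem?, pv_getElem?_snoc]
    have hqn : q[p.length]? = none := List.getElem?_eq_none (by omega)
    have hun : u[p.length]? = none := List.getElem?_eq_none (by omega)
    simp only [List.length_append, List.length_cons, List.length_nil]
    split_ifs <;>
      first
        | rfl
        | omega
        | (subst_vars; simp [hqn, hun])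
  · rw [if_neg hext]
    rw [pvRowsOf_length] at hext
    rw [List.getElem?_modify, pvRowsOf_getElem?, pvRowsOf_getElem?, pv_getElem?_snoc]
    simp only [List.length_append, List.length_cons, List.length_nil]
    split_ifs <;> first | rfl | omega

lemma pv_step_quantity (p q u : List String) (v : String) :
    ((if (pvRowsOf p q u).length <= q.length then pvRowsOf p q u ++ [(none, none, none)]
      else pvRowsOf p q u).modify q.length (fun r => (r.1, some v, r.2.2)))
    = pvRowsOf p (q ++ [v]) u := by
  apply List.ext_getElem?
  intro j
  by_cases hext : (pvRowsOf p q u).length <= q.length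
  · rw [if_pos hext]
    rw [pvRowsOf_length] at hext
    rw [List.getElem?_modify, pv_getElem?_snoc, pvRowsOf_length, pvRowsOf_getElem?,
      pvRowsOf_getElem?, pv_getElem?_snoc]
    have hpn : p[q.length]? = none := List.getElem?_eq_none (by omega)
    have hun : u[q.length]? = none := List.getElem?_eq_none (by omega)
    simp only [List.length_append, List.length_cons, List.length_nil]
    split_ifs <;>
      first
        | rfl
        | omega
        | (subst_vars; simp [hpn, hun])
  · rw [if_neg hext]
    rw [pvRowsOf_length] at hext
    rw [List.getElem?_modify, pvRowsOf_getElem?, pvRowsOf_getElem?, pv_getElem?_snoc]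
    simp only [List.length_append, List.length_cons, List.length_nil]
    split_ifs <;> first | rfl | omega

lemma pv_step_unit (p q u : List String) (v : String) :
    ((if (pvRowsOf p q u).length <= u.length then pvRowsOf p q u ++ [(none, none, none)]
      else pvRowsOf p q u).modify u.length (fun r => (r.1, r.2.1, some v)))
    = pvRowsOf p q (u ++ [v]) := by
  apply List.ext_getElem?
  intro j
  by_cases hext : (pvRowsOf p q u).length <= u.length
  · rw [if_pos hext]
    rw [pvRowsOf_length] at hext
    rw [List.getElem?_modify, pv_getElem?_snoc, pvRowsOf_length, pvRowsOf_getElem?,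
      pvRowsOf_getElem?, pv_getElem?_snoc]
    have hpn : p[u.length]? = none := List.getElem?_eq_none (by omega)
    have hqn : q[u.length]? = none := List.getElem?_eq_none (by omega)
    simp only [List.length_append, List.length_cons, List.length_nil]
    split_ifs <;>
      first
        | rfl
        | omega
        | (subst_vars; simp [hpn, hqn])
  · rw [if_neg hext]
    rw [pvRowsOf_length] at hext
    rw [List.getElem?_modify, pvRowsOf_getElem?, pvRowsOf_getElem?, pv_getElem?_snoc]
    simp only [List.length_append, List.length_cons, List.length_nil]
    split_ifs <;> first | rfl | omega

-- one entity advances B's state exactly as it advances A's buckets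
lemma pv_step_eq (p q u : List String) (e : List (String × String)) :
    pyB_step ((p.length, q.length, u.length), pvRowsOf p q u) e
    = (((pyA_bucket (p, q, u) e).1.length,
        (pyA_bucket (p, q, u) e).2.1.length,
        (pyA_bucket (p, q, u) e).2.2.length),
        pvRowsOf (pyA_bucket (p, q, u) e).1
                 (pyA_bucket (p, q, u) e).2.1
                 (pyA_bucket (p, q, u) e).2.2) := by
  unfold pyB_step pyA_bucket
  cases hn : (PySem.Dict.ofList e).get? "entity" with
  | none => cases hv : (PySem.Dict.ofList e).get? "value" <;> rfl
  | some n =>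
    cases hv : (PySem.Dict.ofList e).get? "value" with
    | none => rfl
    | some v =>
      by_cases h1 : n = "product"
      · simp only [if_pos h1, pv_step_product, List.length_append, List.length_cons,
          List.length_nil]
      · by_cases h2 : n = "quantity"
        · simp only [if_neg h1, if_pos h2, pv_step_quantity, List.length_append,
            List.length_cons, List.length_nil]
        · by_cases h3 : n = "unit"
          · simp only [if_neg h1, if_neg h2, if_pos h3, pv_step_unit, List.length_append,
              List.length_cons, List.length_nil]
          · simp only [if_neg h1, if_neg h2, if_neg h3]

-- B's fold state, expressed from A's bucket fold
lemma pv_fold_inv (raw : List (List (String × String))) :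
    ∀ p q u : List String,
      raw.foldl pyB_step ((p.length, q.length, u.length), pvRowsOf p q u)
      = (((raw.foldl pyA_bucket (p, q, u)).1.length,
          (raw.foldl pyA_bucket (p, q, u)).2.1.length,
          (raw.foldl pyA_bucket (p, q, u)).2.2.length),
          pvRowsOf (raw.foldl pyA_bucket (p, q, u)).1
                   (raw.foldl pyA_bucket (p, q, u)).2.1
                   (raw.foldl pyA_bucket (p, q, u)).2.2) := by
  induction raw with
  | nil => intro p q u; rfl
  | cons e raw ih =>
    intro p q u
    simp only [List.foldl_cons, pv_step_eq]
    exact ih (pyA_bucket (p, q, u) e).1 (pyA_bucket (p, q, u) e).2.1 (pyA_bucket (p, q, u) e).2.2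

-- dict-entry building: A's bounds-checked index equals matching on the optional element
lemma pv_one (k : String) (l : List String) (i : Nat) :
    (if h : i < l.length then [(k, l[i])] else [])
    = (match l[i]? with | some v => [(k, v)] | none => ([] : List (String × String))) := by
  by_cases h : i < l.length
  · rw [dif_pos h, List.getElem?_eq_getElem h]
  · rw [dif_neg h, List.getElem?_eq_none (by omega)]

-- A's item at i equals B's rendering of the i-th row slots
lemma pv_item_render (p q u : List String) (i : Nat) :
    pyA_item p q u i = pyB_render (p[i]?, q[i]?, u[i]?) := by
  unfold pyA_item pyB_render
  rw [pv_one, pv_one, pv_one]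

lemma pv_item_ne_nil (p q u : List String) (i : Nat)
    (h : i < max (max p.length q.length) u.length) : pyA_item p q u i ≠ [] := by
  unfold pyA_item
  by_cases hp : i < p.length
  · simp [hp]
  · by_cases hq : i < q.length
    · simp [hq]
    · have hu : i < u.length := by omega
      simp [hu]

-- A's second loop equals mapping pyB_render over the rows
lemma pv_loop_eq_map (p q u : List String) :
    (List.range (max (max p.length q.length) u.length)).foldl
      (fun grouped i =>
        let item := pyA_item p q u i
        if item = [] then grouped else grouped ++ [item]) []
    = (pvRowsOf p q u).map pyB_render := by
  have h1 : (List.range (max (max p.length q.length) u.length)).foldl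
      (fun grouped i =>
        let item := pyA_item p q u i
        if item = [] then grouped else grouped ++ [item]) []
      = (List.range (max (max p.length q.length) u.length)).foldl
          (fun grouped i =>
            if (fun _ : Nat => true) i = true then grouped ++ [pyA_item p q u i]
            else grouped) [] := by
    apply PySem.List.foldl_congr_mem
    intro acc i hi
    simp [pv_item_ne_nil p q u i (List.mem_range.mp hi)]
  rw [h1, PySem.List.foldl_append_if]
  simp only [List.filter_true, List.nil_append, pvRowsOf, List.map_map]
  exact List.map_congr_left (fun i _ => pv_item_render p q u i)

-- ===== VERDICT (by name: the statement is the Claim_ definition above) =====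
theorem group_raw_rasa_entities_py_spec : Claim_equal_group_raw_rasa_entities_py := by
  intro raw _
  unfold Spec_group_raw_rasa_entities_py
  unfold group_raw_rasa_entities_py group_raw_rasa_entities_py_alt
  by_cases hraw : raw = []
  · simp [hraw]
  · simp only [if_neg hraw]
    have h := pv_fold_inv raw [] [] []
    simp only [List.length_nil] at h
    have h0 : pvRowsOf [] [] [] = ([] : List (Option String × Option String × Option String)) := by
      simp [pvRowsOf]
    rw [h0] at h
    rw [h, pv_loop_eq_map]
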